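-- pv_equiv track=rewrite | github.com/KoGaYoung/Algorithm | 알고리즘/테스트/네파max_a.py | solution
-- ===== SOURCE A (Python) =====
-- def solution(S):
--     # write your code in Python 3.6
--     flag = False
--     if 'aaa' in S:
--         return -1
--     elif S == 'aa':
--         return 0
--     else:
--         origin_S = S
--         S = S.replace('a', '')
--         s_list = []
--         for ch in S:
--             s_list.append(ch + 'aa')
--         S = ''.join(s_list)
--         S = 'aa' + S
--         return len(S) - len(origin_S)
-- ===== SOURCE B (Python) =====
-- def solution(S):
--     # write your code in Python 3.6
--     if 'aaa' in S:
--         return -1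
--     m = sum(1 for c in S if c != 'a')
--     return 3 * m + 2 - len(S)
-- ===== Notes on version B (the rewrite author's own statement) =====
-- stated objective: simpler
-- what changed: Replaced the string rebuilding (strip the letter, re-append two copies after each remaining character, prepend, join, compare lengths) and the redundant special case by counting the non-'a' characters once and returning a closed arithmetic form, avoiding all intermediate string construction.
import Mathlib
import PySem

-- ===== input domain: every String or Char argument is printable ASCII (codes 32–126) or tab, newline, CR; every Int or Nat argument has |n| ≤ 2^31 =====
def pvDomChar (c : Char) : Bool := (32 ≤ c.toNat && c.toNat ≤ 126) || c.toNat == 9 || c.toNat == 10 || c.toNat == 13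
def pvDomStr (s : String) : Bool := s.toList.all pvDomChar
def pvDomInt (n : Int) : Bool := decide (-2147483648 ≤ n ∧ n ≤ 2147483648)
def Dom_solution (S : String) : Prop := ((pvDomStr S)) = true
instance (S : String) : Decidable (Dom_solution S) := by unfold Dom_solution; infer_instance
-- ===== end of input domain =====

-- B replaces A's string rebuilding by a count of non-'a' characters and the closed form 3*m + 2 - len(S) (simpler).

-- ===== PORT A =====
def solution (S : String) : Int :=
  if PySem.Str.isIn "aaa" S then -1
  else if S = "aa" then 0
  else
    let originS := S.toList
    let s1 := PySem.Chars.replace S.toList "a".toList "".toList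
    let sList := s1.foldl (fun (acc : List (List Char)) ch => acc ++ [ch :: "aa".toList]) []
    let s2 := PySem.Chars.join [] sList
    let s3 := "aa".toList ++ s2
    PySem.Chars.len s3 - PySem.Chars.len originS

-- ===== PORT B =====
def solution_alt (S : String) : Int :=
  if PySem.Str.isIn "aaa" S then -1
  else 3 * (S.toList.countP (fun c => c != 'a') : Int) + 2 - PySem.Str.len S

-- ===== PRECONDITION & SPEC =====
def Spec_solution (S : String) (out : Int) : Prop := out = solution_alt S
instance (S : String) (out : Int) : Decidable (Spec_solution S out) := by unfold Spec_solution; infer_instance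

-- ===== CLAIM (what is proved, stated in full; the proofs are below) =====
def Claim_equal_solution : Prop := ∀ (S : String), Dom_solution S → Spec_solution S (solution S)

-- ===== LEMMAS AND PROOFS =====

-- replace.go with old = ['a'], new = [] filters out the 'a's (fuel suffices)
theorem replace_go_filter_a (l : List Char) : ∀ (fuel : Nat) (acc : List Char), l.length ≤ fuel →
    PySem.Chars.replace.go ['a'] [] fuel l acc = acc.reverse ++ l.filter (fun c => c != 'a') := by
  induction l with
  | nil => intro fuel acc _; cases fuel <;> simp [PySem.Chars.replace.go]
  | cons c t ih =>
    intro fuel acc h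
    cases fuel with
    | zero => simp at h
    | succ f =>
      simp only [PySem.Chars.replace.go]
      by_cases hc : c = 'a'
      · subst hc
        simp only [List.isPrefixOf, beq_self_eq_true, Bool.true_and, if_pos,
          List.length_singleton, List.drop_one, List.tail_cons, List.reverse_nil, List.nil_append]
        rw [ih f acc (by simpa using h)]
        simp
      · have : List.isPrefixOf ['a'] (c :: t) = false := by
          simp [List.isPrefixOf]; exact fun h' => (hc h'.symm).elim
        rw [this]
        simp only [Bool.false_eq_true, if_false]
        rw [ih f (c :: acc) (by simpa using h)]
        simp [hc]

theorem join_nil_flatten (parts : List (List Char)) :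
    PySem.Chars.join [] parts = parts.flatten := by
  match parts with
  | [] => simp [PySem.Chars.join_nil]
  | [p] => simp [PySem.Chars.join_singleton]
  | p :: q :: r =>
    rw [PySem.Chars.join_cons_cons, join_nil_flatten (q :: r)]
    simp

-- ===== VERDICT (by name: the statement is the Claim_ definition above) =====
theorem solution_spec : Claim_equal_solution := by
  intro S _
  unfold Spec_solution solution solution_alt
  by_cases hin : PySem.Str.isIn "aaa" S = true
  · rw [if_pos hin, if_pos hin]
  · rw [if_neg hin, if_neg hin]
    by_cases haa : S = "aa"
    · subst haa; decide
    · simp only [haa, if_false]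
      rw [show PySem.Chars.replace S.toList "a".toList "".toList
            = PySem.Chars.replace.go ['a'] [] S.toList.length S.toList [] from by
          simp [PySem.Chars.replace]]
      rw [replace_go_filter_a S.toList S.toList.length [] le_rfl]
      rw [PySem.List.foldl_append_singleton_eq_map]
      rw [join_nil_flatten]
      simp only [List.nil_append, List.reverse_nil]
      simp [PySem.Chars.len, PySem.Str.len, List.length_flatten,
        List.map_map, Function.comp_def, List.countP_eq_length_filter]
      ring
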